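-- pv_equiv track=rewrite | github.com/mace6728/COVID-19-anti-vaccine-tweets-classification | dataset.py | encode_text_to_ids
-- ===== SOURCE A (Python) =====
-- from typing import Dict, Iterable, List, Optional, Sequence, Tuple
--
-- PAD_INDEX = 0
--
-- UNK_INDEX = 1
--
-- def simple_tokenize(text: str) -> List[str]:
--     return text.strip().split()
--
-- def encode_text_to_ids(
--     text: str, vocab: Dict[str, int], max_length: int
-- ) -> Tuple[List[int], List[int]]:
--     tokens = simple_tokenize(text)
--     token_ids = [vocab.get(tok, UNK_INDEX) for tok in tokens][:max_length]
--     attention_mask = [1] * len(token_ids)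
--
--     pad_len = max_length - len(token_ids)
--     if pad_len > 0:
--         token_ids.extend([PAD_INDEX] * pad_len)
--         attention_mask.extend([0] * pad_len)
--
--     return token_ids, attention_mask
-- ===== SOURCE B (Python) =====
-- PAD_INDEX = 0
--
-- UNK_INDEX = 1
--
--
-- def simple_tokenize(text):
--     return text.strip().split()
--
--
-- def encode_text_to_ids(text, vocab, max_length):
--     # One loop over the output positions: each slot is either a looked-up token or a pad.
--     tokens = simple_tokenize(text)
--     token_ids = []
--     attention_mask = []
--     for i in range(max_length):
--         if i < len(tokens):
--             token_ids.append(vocab.get(tokens[i], UNK_INDEX))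
--             attention_mask.append(1)
--         else:
--             token_ids.append(PAD_INDEX)
--             attention_mask.append(0)
--     return token_ids, attention_mask
-- ===== Notes on version B (the rewrite author's own statement) =====
-- stated objective: alternative
-- what changed: B loops once over the output positions range(max_length), filling each slot with either a vocab lookup or a pad, instead of building a truncated id list, deriving the mask from its length and conditionally extending both with padding; Pre_ excludes negative max_length on texts with at least one token (a padding length is naturally nonnegative; A's truncate-without-padding value there is an accident of Python's negative-slice semantics).
-- outside the precondition, e.g. on encode_text_to_ids('a b', {}, -1): A returns ([1], [1]), B returns ([], [])
import Mathlib
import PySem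

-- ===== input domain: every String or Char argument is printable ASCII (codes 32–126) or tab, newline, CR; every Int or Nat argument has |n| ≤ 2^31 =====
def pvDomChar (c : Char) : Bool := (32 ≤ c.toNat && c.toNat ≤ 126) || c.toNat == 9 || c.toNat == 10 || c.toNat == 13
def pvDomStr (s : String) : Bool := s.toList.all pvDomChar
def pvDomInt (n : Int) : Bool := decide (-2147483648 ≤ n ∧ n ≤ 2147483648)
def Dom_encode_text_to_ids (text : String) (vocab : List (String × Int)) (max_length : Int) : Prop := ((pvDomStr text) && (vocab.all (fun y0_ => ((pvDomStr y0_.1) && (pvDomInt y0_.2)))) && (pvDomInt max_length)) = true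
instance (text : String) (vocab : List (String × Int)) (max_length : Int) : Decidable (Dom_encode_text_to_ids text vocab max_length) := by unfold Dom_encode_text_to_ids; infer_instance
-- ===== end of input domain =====

set_option maxRecDepth 10000


-- B fills the output with a single loop over the max_length output positions
-- (token-or-pad per slot) instead of build-truncate-then-pad; same cost.

-- ===== PORT A =====
def simple_tokenize (text : String) : List String :=
  PySem.Str.split₀ (PySem.Str.strip text)

def encode_text_to_ids (text : String) (vocab : List (String × Int)) (max_length : Int) : List Int × List Int :=
  let tokens := simple_tokenize text
  let token_ids := PySem.List.slice (tokens.map (fun tok => PySem.Dict.getD (PySem.Dict.ofList vocab) tok 1)) none (some max_length)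
  let attention_mask := List.replicate token_ids.length (1 : Int)
  let pad_len : Int := max_length - (token_ids.length : Int)
  if pad_len > 0 then
    (token_ids ++ List.replicate pad_len.toNat (0 : Int),
     attention_mask ++ List.replicate pad_len.toNat (0 : Int))
  else
    (token_ids, attention_mask)

-- ===== PORT B =====
def simple_tokenize_alt (text : String) : List String :=
  PySem.Str.split₀ (PySem.Str.strip text)

def encode_text_to_ids_alt (text : String) (vocab : List (String × Int)) (max_length : Int) : List Int × List Int :=
  let tokens := simple_tokenize_alt text
  (PySem.List.pyRange 0 max_length 1).foldl
    (fun st i =>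
      if i < (tokens.length : Int) then
        (st.1 ++ [PySem.Dict.getD (PySem.Dict.ofList vocab) (PySem.List.pyGetD tokens i "") 1],
         st.2 ++ [(1 : Int)])
      else
        (st.1 ++ [(0 : Int)], st.2 ++ [(0 : Int)]))
    ([], [])

-- ===== PRECONDITION & SPEC =====
-- Pre_ excludes negative max_length on texts with more than -max_length tokens: a padding
-- length is naturally nonnegative, and A's truncate-without-padding value there is an
-- accident of Python's negative-slice semantics (with fewer tokens both yield empty lists,
-- so those inputs stay inside).
def Pre_encode_text_to_ids (text : String) (vocab : List (String × Int)) (max_length : Int) : Prop := 0 ≤ max_length ∨ (((PySem.Str.split₀ (PySem.Str.strip text)).length : Int) ≤ -max_length)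
instance (text : String) (vocab : List (String × Int)) (max_length : Int) : Decidable (Pre_encode_text_to_ids text vocab max_length) := by unfold Pre_encode_text_to_ids; infer_instance

def pvWitness_encode_text_to_ids : String × (List (String × Int)) × Int := ("hello world", [("hello", 5)], 3)

def Spec_encode_text_to_ids (text : String) (vocab : List (String × Int)) (max_length : Int) (out : List Int × List Int) : Prop := out = encode_text_to_ids_alt text vocab max_length
instance (text : String) (vocab : List (String × Int)) (max_length : Int) (out : List Int × List Int) : Decidable (Spec_encode_text_to_ids text vocab max_length out) := by unfold Spec_encode_text_to_ids; infer_instance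

-- ===== CLAIM (what is proved, stated in full; the proofs are below) =====
def Claim_equal_encode_text_to_ids : Prop := ∀ (text : String) (vocab : List (String × Int)) (max_length : Int), Dom_encode_text_to_ids text vocab max_length → Pre_encode_text_to_ids text vocab max_length → Spec_encode_text_to_ids text vocab max_length (encode_text_to_ids text vocab max_length)

-- ===== LEMMAS AND PROOFS =====

/-- B's position loop, characterized: the first `min n L` slots carry looked-up
tokens (and mask 1), the remaining `n - L` slots carry pads (and mask 0). -/
theorem fold_positions (tokens : List String) (f : String → Int) (n : Nat) :
    (PySem.List.pyRange 0 (n : Int) 1).foldl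
      (fun st i =>
        if i < (tokens.length : Int) then
          (st.1 ++ [f (PySem.List.pyGetD tokens i "")], st.2 ++ [(1 : Int)])
        else
          (st.1 ++ [(0 : Int)], st.2 ++ [(0 : Int)]))
      ([], [])
    = ((tokens.take n).map f ++ List.replicate (n - tokens.length) (0 : Int),
       List.replicate (min n tokens.length) (1 : Int) ++ List.replicate (n - tokens.length) (0 : Int)) := by
  induction n with
  | zero => simp [PySem.List.pyRange_one_eq_nil]
  | succ n ih =>
    have hsplit : PySem.List.pyRange 0 ((n + 1 : Nat) : Int) 1
        = PySem.List.pyRange 0 (n : Int) 1 ++ [(n : Int)] := by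
      have := PySem.List.pyRange_one_succ_right (a := 0) (b := (n : Int)) (by positivity)
      push_cast
      push_cast at this
      exact this
    rw [hsplit, List.foldl_append, ih]
    simp only [List.foldl_cons, List.foldl_nil]
    by_cases h : n < tokens.length
    · rw [if_pos (by exact_mod_cast h)]
      have hget : PySem.List.pyGetD tokens ((n : Nat) : Int) "" = tokens[n] := by
        rw [PySem.List.pyGetD_natCast]
        exact List.getD_eq_getElem tokens "" h
      have htake : tokens.take (n + 1) = tokens.take n ++ [tokens[n]] := by
        rw [List.take_succ]
        simp [List.getElem?_eq_getElem h]
      have h1 : n + 1 - tokens.length = 0 := by omega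
      have h2 : n - tokens.length = 0 := by omega
      have h3 : min (n + 1) tokens.length = min n tokens.length + 1 := by omega
      rw [hget, htake, h1, h2, h3]
      simp only [List.replicate_zero, List.append_nil, List.map_append, List.map_cons,
        List.map_nil, List.replicate_succ']
    · rw [if_neg (by exact_mod_cast h)]
      have htake1 : tokens.take (n + 1) = tokens := List.take_of_length_le (by omega)
      have htake0 : tokens.take n = tokens := List.take_of_length_le (by omega)
      have h1 : n + 1 - tokens.length = (n - tokens.length) + 1 := by omega
      have h3 : min (n + 1) tokens.length = min n tokens.length := by omega
      rw [htake1, htake0, h1, h3, List.replicate_succ']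
      simp only [List.append_assoc]

theorem encode_main (text : String) (vocab : List (String × Int)) (m : Int) (hm : 0 ≤ m) :
    encode_text_to_ids text vocab m = encode_text_to_ids_alt text vocab m := by
  unfold encode_text_to_ids encode_text_to_ids_alt simple_tokenize simple_tokenize_alt
  dsimp only
  set tokens := PySem.Str.split₀ (PySem.Str.strip text) with htok
  set f : String → Int := fun tok => PySem.Dict.getD (PySem.Dict.ofList vocab) tok 1 with hf
  have hmn : m = ((m.toNat : Nat) : Int) := (Int.toNat_of_nonneg hm).symm
  rw [hmn]
  rw [fold_positions tokens f m.toNat]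
  rw [PySem.List.slice_to _ (by positivity)]
  set n := m.toNat with hn
  have hlen : ((tokens.map f).take n).length = min n tokens.length := by
    simp [List.length_take]
  rw [← List.map_take]
  simp only [List.length_map, List.length_take]
  simp only [Int.toNat_natCast]
  by_cases hL : tokens.length < n
  · rw [if_pos (by push_cast; omega)]
    have he : ((n : Int) - ((min n tokens.length : Nat) : Int)).toNat = n - tokens.length := by
      omega
    rw [he]
  · rw [if_neg (by push_cast; omega)]
    have h1 : n - tokens.length = 0 := by omega
    simp [h1]

set_option maxHeartbeats 1000000 in
theorem encode_neg (text : String) (vocab : List (String × Int)) (m : Int)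
    (hm : m < 0)
    (hL : ((PySem.Str.split₀ (PySem.Str.strip text)).length : Int) ≤ -m) :
    encode_text_to_ids text vocab m = encode_text_to_ids_alt text vocab m := by
  unfold encode_text_to_ids encode_text_to_ids_alt simple_tokenize simple_tokenize_alt
  dsimp only
  set tokens := PySem.Str.split₀ (PySem.Str.strip text) with htok
  have hk : 0 < (-m).toNat := by omega
  have hslice : PySem.List.slice
      (tokens.map (fun tok => PySem.Dict.getD (PySem.Dict.ofList vocab) tok 1)) none (some m) = [] := by
    have hb' : m = -(((-m).toNat : Nat) : Int) := by omega
    rw [hb', PySem.List.slice_to_neg_natCast _ _ hk]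
    have h0 : tokens.length - (-m).toNat = 0 := by omega
    simp [h0]
  rw [hslice, PySem.List.pyRange_one_eq_nil (by omega)]
  simp
  omega

-- ===== VERDICT (by name: the statement is the Claim_ definition above) =====
theorem encode_text_to_ids_spec : Claim_equal_encode_text_to_ids := by
  intro text vocab m _ hm
  unfold Spec_encode_text_to_ids
  rcases lt_or_ge m 0 with hneg | hpos
  · rcases hm with hm | hm
    · omega
    · exact encode_neg text vocab m hneg hm
  · exact encode_main text vocab m hpos
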